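-- pv_equiv track=rewrite | github.com/belema19/beat-your-demons | logic.py | honor_points
-- ===== SOURCE A (Python) =====
-- def honor_points(battle_log:list[dict]) -> int:
--     """Calculate honor points every time a battle status is changed"""
--
--     if not battle_log:
--         raise ValueError('\nCannot calculate honor points on empty battle_logs\n')
--
--     battle_log = battle_log
--
--     points = 0
--
--     for battle in battle_log:
--
--         if battle['result'] == 'victory':
--             points += 5
--
--         elif battle['result'] == 'started':
--             points += 2
--
--         else:
--             points -= 5
--
--     return points
-- ===== SOURCE B (Python) =====
-- def honor_points(battle_log: list[dict]) -> int:
--     """Calculate honor points every time a battle status is changed"""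
--
--     if not battle_log:
--         raise ValueError('\nCannot calculate honor points on empty battle_logs\n')
--
--     results = [battle['result'] for battle in battle_log]
--     victories = results.count('victory')
--     started = results.count('started')
--     return 5 * victories + 2 * started - 5 * (len(battle_log) - victories - started)
-- ===== Notes on version B (the rewrite author's own statement) =====
-- stated objective: alternative
-- what changed: Replaced the accumulate-and-branch loop with a tally pass (count 'victory' and 'started' occurrences) followed by a single closed-form arithmetic expression; the else bucket is len minus the two named counts.
-- outside the precondition, e.g. on honor_points([]): A raises ValueError, B raises ValueError; on honor_points([{}]): A raises KeyError, B raises KeyError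
import Mathlib
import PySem

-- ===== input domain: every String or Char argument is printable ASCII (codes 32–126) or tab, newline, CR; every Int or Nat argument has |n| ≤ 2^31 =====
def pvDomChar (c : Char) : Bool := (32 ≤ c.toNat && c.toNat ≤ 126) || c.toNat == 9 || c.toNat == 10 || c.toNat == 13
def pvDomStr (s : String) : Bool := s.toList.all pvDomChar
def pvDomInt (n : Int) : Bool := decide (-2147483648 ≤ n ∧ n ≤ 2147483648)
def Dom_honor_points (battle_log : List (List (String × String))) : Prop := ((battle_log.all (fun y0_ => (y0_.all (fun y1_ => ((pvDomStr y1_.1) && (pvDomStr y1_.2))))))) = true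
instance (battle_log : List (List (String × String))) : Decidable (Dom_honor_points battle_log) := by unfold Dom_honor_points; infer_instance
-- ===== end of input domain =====

-- ===== PORT A =====
-- B replaces A's accumulate-and-branch loop by counting 'victory'/'started' plus one closed-form expression (alternative decomposition, same cost).
-- dict lookup (first match in the association list); Python raises KeyError when the key is absent — Pre_ excludes that.
def resultOf (battle : List (String × String)) : String :=
  match battle.find? (fun p => p.1 == "result") with
  | some p => p.2
  | none => ""

def honor_points (battle_log : List (List (String × String))) : Int :=
  battle_log.foldl (fun points battle =>
    if resultOf battle = "victory" then points + 5
    else if resultOf battle = "started" then points + 2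
    else points - 5) 0

-- ===== PORT B =====
def honor_points_alt (battle_log : List (List (String × String))) : Int :=
  let results := battle_log.map resultOf
  let victories : Int := (results.count "victory" : Nat)
  let started : Int := (results.count "started" : Nat)
  5 * victories + 2 * started - 5 * ((battle_log.length : Int) - victories - started)

-- ===== PRECONDITION & SPEC =====
-- Pre_ excludes exactly the inputs where Python A raises: the empty list (ValueError)
-- and logs containing a dict without the key 'result' (KeyError).
def Pre_honor_points (battle_log : List (List (String × String))) : Prop :=
  battle_log ≠ [] ∧ (battle_log.all (fun b => (b.find? (fun p => p.1 == "result")).isSome)) = true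
instance (battle_log : List (List (String × String))) : Decidable (Pre_honor_points battle_log) := by unfold Pre_honor_points; infer_instance
def pvWitness_honor_points : (List (List (String × String))) := [[("result", "victory")]]
def Spec_honor_points (battle_log : List (List (String × String))) (out : Int) : Prop := out = honor_points_alt battle_log
instance (battle_log : List (List (String × String))) (out : Int) : Decidable (Spec_honor_points battle_log out) := by unfold Spec_honor_points; infer_instance

-- ===== CLAIM (what is proved, stated in full; the proofs are below) =====
def Claim_equal_honor_points : Prop := ∀ (battle_log : List (List (String × String))), Dom_honor_points battle_log → Pre_honor_points battle_log → Spec_honor_points battle_log (honor_points battle_log)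

-- ===== LEMMAS AND PROOFS =====
theorem honor_points_foldl (l : List (List (String × String))) : ∀ (p : Int),
    l.foldl (fun points battle =>
      if resultOf battle = "victory" then points + 5
      else if resultOf battle = "started" then points + 2
      else points - 5) p
    = p + 5 * ((l.map resultOf).count "victory" : Nat)
        + 2 * ((l.map resultOf).count "started" : Nat)
        - 5 * ((l.length : Int) - ((l.map resultOf).count "victory" : Nat)
               - ((l.map resultOf).count "started" : Nat)) := by
  induction l with
  | nil => intro p; simp
  | cons b t ih =>
    intro p
    simp only [List.foldl_cons, List.map_cons, List.count_cons, List.length_cons, ih]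
    by_cases hv : resultOf b = "victory"
    · simp [hv]; ring
    · by_cases hs : resultOf b = "started"
      · simp [hs]; ring
      · simp [hv, hs]; ring

-- ===== VERDICT (by name: the statement is the Claim_ definition above) =====
theorem honor_points_spec : Claim_equal_honor_points := by
  intro battle_log _ _
  unfold Spec_honor_points honor_points honor_points_alt
  rw [honor_points_foldl]
  push_cast
  ring
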